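-- pv_equiv track=rewrite | github.com/IAidenI/CTF_WriteUps | 404CTF 2023/Programation/Difficile - Des mots, des mots, des mots.py | tri_occurrences
-- ===== SOURCE A (Python) =====
-- def tri_occurrences(val):
--     occurrences = {}
--     for c in val:
--         if c in occurrences:
--             occurrences[c] += 1
--         else:
--             occurrences[c] = 1
--
--     sorted_chars = sorted(occurrences.keys(), key=lambda c: (-occurrences[c], ord(c)))
--
--     sorted_val = ""
--     for c in sorted_chars:
--         sorted_val += c * occurrences[c]
--
--     return sorted_val
-- ===== SOURCE B (Python) =====
-- def tri_occurrences(val):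
--     counts = {}
--     for c in val:
--         counts[c] = counts.get(c, 0) + 1
--
--     buckets = {}
--     for c, n in counts.items():
--         buckets[n] = buckets.get(n, []) + [c]
--
--     mx = 0
--     for n in counts.values():
--         mx = max(mx, n)
--
--     out = []
--     for f in reversed(range(1, mx + 1)):
--         if f in buckets:
--             for c in sorted(buckets[f]):
--                 out.append(c * f)
--     return "".join(out)
-- ===== Notes on version B (the rewrite author's own statement) =====
-- stated objective: alternative
-- what changed: Replaces the comparison sort over the composite key (-count, ord) by frequency bucketing: characters are grouped into a dict keyed by their count, then buckets are emitted from the maximum frequency downward, each bucket sorted by codepoint alone.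
import Mathlib
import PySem

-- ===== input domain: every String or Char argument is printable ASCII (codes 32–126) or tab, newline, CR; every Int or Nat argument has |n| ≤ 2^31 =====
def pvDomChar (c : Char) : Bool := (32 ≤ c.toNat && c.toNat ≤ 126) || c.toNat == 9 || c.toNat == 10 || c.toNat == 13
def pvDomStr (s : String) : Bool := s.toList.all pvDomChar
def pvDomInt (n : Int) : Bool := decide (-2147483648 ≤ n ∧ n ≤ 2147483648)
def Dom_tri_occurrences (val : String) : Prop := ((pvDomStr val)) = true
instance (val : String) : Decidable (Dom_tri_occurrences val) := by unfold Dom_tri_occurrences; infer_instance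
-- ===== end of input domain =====

-- B replaces A's single comparison sort over the composite key (-count, ord) by frequency
-- bucketing: group the characters by their count, then emit the buckets from the maximal
-- count downward, each bucket sorted by codepoint alone (objective: alternative).

-- ===== PORT A =====
def tri_occurrences (val : String) : String :=
  let occurrences := val.toList.foldl
    (fun d c => if d.contains c then d.insert c (d.getD c 0 + 1) else d.insert c 1)
    (PySem.Dict.empty : PySem.Dict Char Int)
  let sorted_chars := PySem.List.sorted2 occurrences.keys
    (fun c => -(occurrences.getD c 0)) (fun c => (c.toNat : Int))
  let sorted_val := sorted_chars.foldl
    (fun s c => s ++ PySem.List.pyRepeat [c] (occurrences.getD c 0)) ([] : List Char)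
  String.ofList sorted_val

-- ===== PORT B =====
def tri_occurrences_alt (val : String) : String :=
  let counts := val.toList.foldl
    (fun d c => d.insert c (d.getD c 0 + 1)) (PySem.Dict.empty : PySem.Dict Char Int)
  let buckets := counts.items.foldl
    (fun b p => b.modify p.2 [] (fun cs => cs ++ [p.1]))
    (PySem.Dict.empty : PySem.Dict Int (List Char))
  let mx := counts.values.foldl (fun m n => max m n) (0 : Int)
  let out := ((PySem.List.pyRange 1 (mx + 1)).reverse).foldl
    (fun acc f =>
      if buckets.contains f then
        (PySem.List.sorted (buckets.getD f []) (fun c => c)).foldl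
          (fun acc2 c => acc2 ++ [PySem.List.pyRepeat [c] f]) acc
      else acc)
    ([] : List (List Char))
  String.ofList out.flatten

-- ===== PRECONDITION & SPEC =====
def Spec_tri_occurrences (val : String) (out : String) : Prop := out = tri_occurrences_alt val
instance (val : String) (out : String) : Decidable (Spec_tri_occurrences val out) := by unfold Spec_tri_occurrences; infer_instance

-- ===== CLAIM (what is proved, stated in full; the proofs are below) =====
def Claim_equal_tri_occurrences : Prop := ∀ (val : String), Dom_tri_occurrences val → Spec_tri_occurrences val (tri_occurrences val)

-- ===== LEMMAS AND PROOFS =====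

-- pvKey l c is a single Int key order-isomorphic to Python's tuple (-count, ord).
def pvKey (l : List Char) (c : Char) : Int :=
  -(l.count c : Int) * 4294967296 + (c.toNat : Int)

-- The canonical output both programs are reduced to: the distinct characters sorted
-- by pvKey, each repeated its count.
def pvCanon (l : List Char) : List Char :=
  (PySem.List.sorted (PySem.Set.ofList l) (pvKey l)).flatMap
    (fun c => List.replicate (l.count c) c)

lemma charBound (c : Char) : c.toNat < 4294967296 := UInt32.toNat_lt_size c.val

-- A's two-component sort collapses to the single Int key pvKey-style combination.
lemma sorted2_ord_eq_sorted (xs : List Char) (f : Char → Int) :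
    PySem.List.sorted2 xs f (fun c => (c.toNat : Int)) =
    PySem.List.sorted xs (fun c => f c * 4294967296 + (c.toNat : Int)) := by
  have hpred : (fun a b : Char => decide (f a < f b) || !decide (f b < f a) && decide ((a.toNat : Int) < (b.toNat : Int)))
      = (fun a b : Char => decide (f a * 4294967296 + (a.toNat : Int) < f b * 4294967296 + (b.toNat : Int))) := by
    funext a b
    have ha := charBound a
    have hb := charBound b
    rw [Bool.eq_iff_iff]
    simp only [Bool.or_eq_true, Bool.and_eq_true, Bool.not_eq_true', decide_eq_true_eq,
      decide_eq_false_iff_not]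
    omega
  simp only [PySem.List.sorted2, PySem.List.sorted, if_neg (Bool.false_ne_true)]
  rw [hpred]

-- A's if/else counting loop is Counter.
lemma counter_eq_A_fold (l : List Char) :
    l.foldl (fun d c => if d.contains c then d.insert c (d.getD c 0 + 1) else d.insert c 1)
      PySem.Dict.empty = PySem.Dict.counter l := by
  rw [← PySem.Dict.foldl_insert_getD_add_one_eq_counter]
  congr 1
  funext d c
  by_cases h : d.contains c
  · simp [h]
  · simp [h, PySem.Dict.getD_of_not_contains d 0 (by simpa using h)]

lemma A_canon (val : String) :
    tri_occurrences val = String.ofList (pvCanon val.toList) := by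
  unfold tri_occurrences pvCanon
  simp only [counter_eq_A_fold, PySem.Dict.keys_counter, PySem.Dict.getD_counter]
  rw [sorted2_ord_eq_sorted]
  rw [PySem.List.foldl_append_eq_flatMap]
  simp only [List.nil_append, PySem.List.pyRepeat_singleton, Int.toNat_natCast, Int.neg_mul]
  have : (fun c : Char => -((List.count c val.toList : Int) * 4294967296) + (c.toNat : Int))
      = pvKey val.toList := by
    funext c
    simp [pvKey]
  rw [this]

lemma pyRange_pairwise_lt (a b : Int) :
    (PySem.List.pyRange a b).Pairwise (· < ·) := by
  by_cases hab : a < b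
  · have h : ∀ n : Nat, ∀ a : Int, (b - a).toNat = n → (PySem.List.pyRange a b).Pairwise (· < ·) := by
      intro n
      induction n with
      | zero =>
        intro a ha
        have : PySem.List.pyRange a b = [] := by simp [PySem.List.pyRange]; omega
        simp [this]
      | succ k ih =>
        intro a ha
        by_cases h' : a < b
        · rw [PySem.List.pyRange_one_cons h']
          refine List.Pairwise.cons ?_ (ih (a + 1) (by omega))
          intro x hx
          have := PySem.List.mem_pyRange_one.mp hx
          omega
        · have : PySem.List.pyRange a b = [] := by simp [PySem.List.pyRange]; omega
          simp [this]
    exact h (b - a).toNat a rfl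
  · have : PySem.List.pyRange a b = [] := by simp [PySem.List.pyRange]; omega
    simp [this]

-- Concatenating, over a duplicate-free list of values covering g, the g-fibres of xs
-- yields a permutation of xs.
lemma flatMap_filter_perm (g : Char → Int) : ∀ (fs : List Int) (xs : List Char),
    fs.Nodup → (∀ x ∈ xs, g x ∈ fs) →
    (fs.flatMap (fun f => xs.filter (fun x => g x == f))).Perm xs := by
  intro fs
  induction fs with
  | nil =>
    intro xs _ hcov
    cases xs with
    | nil => simp
    | cons y ys => exact absurd (hcov y (by simp)) (by simp)
  | cons f rest ih =>
    intro xs hnd hcov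
    have hrw : rest.flatMap (fun f' => xs.filter (fun x => g x == f'))
        = rest.flatMap (fun f' => (xs.filter (fun x => !(g x == f))).filter (fun x => g x == f')) := by
      apply List.flatMap_congr
      intro f' hf'
      rw [List.filter_filter]
      apply List.filter_congr
      intro x _
      by_cases hx : g x = f'
      · have hne : f' ≠ f := fun h => (List.nodup_cons.mp hnd).1 (h ▸ hf')
        simp [hx, hne]
      · simp [hx]
    have hcov' : ∀ x ∈ xs.filter (fun x => !(g x == f)), g x ∈ rest := by
      intro x hx
      have hmem := List.mem_filter.mp hx
      have := hcov x hmem.1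
      simp at hmem
      rcases List.mem_cons.mp this with h | h
      · exact absurd h hmem.2
      · exact h
    have hperm := ih (xs.filter (fun x => !(g x == f))) (List.nodup_cons.mp hnd).2 hcov'
    rw [List.flatMap_cons, hrw]
    exact (List.Perm.append_left _ hperm).trans (List.filter_append_perm _ xs)

lemma mem_block {l : List Char} {f : Int} {x : Char}
    (hx : x ∈ PySem.List.sorted ((PySem.Set.ofList l).filter (fun c => (l.count c : Int) == f)) (fun c => c)) :
    (l.count x : Int) = f := by
  rw [PySem.List.mem_sorted] at hx
  have := (List.mem_filter.mp hx).2
  simpa using this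

-- The heart of the equivalence: B's descending sweep over frequency buckets, each bucket
-- sorted by codepoint, IS the sorted order of the distinct characters under pvKey.
lemma sorted_key_eq (l : List Char) (mx : Int)
    (hmx : ∀ x ∈ PySem.Set.ofList l, 1 ≤ (l.count x : Int) ∧ (l.count x : Int) ≤ mx) :
    PySem.List.sorted (PySem.Set.ofList l) (pvKey l)
    = ((PySem.List.pyRange 1 (mx + 1)).reverse).flatMap
        (fun f => PySem.List.sorted
          ((PySem.Set.ofList l).filter (fun c => (l.count c : Int) == f)) (fun c => c)) := by
  have hRnd : ((PySem.List.pyRange 1 (mx + 1)).reverse).Nodup := by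
    rw [List.nodup_reverse]
    exact ((pyRange_pairwise_lt 1 (mx + 1)).imp (fun h => ne_of_lt h))
  apply PySem.List.sorted_eq_of_perm_of_pairwise_lt
  · have h1 : (((PySem.List.pyRange 1 (mx + 1)).reverse).flatMap
        (fun f => PySem.List.sorted
          ((PySem.Set.ofList l).filter (fun c => (l.count c : Int) == f)) (fun c => c))).Perm
        (((PySem.List.pyRange 1 (mx + 1)).reverse).flatMap
        (fun f => (PySem.Set.ofList l).filter (fun c => (l.count c : Int) == f))) :=
      List.Perm.flatMap (List.Perm.refl _) (fun f _ => PySem.List.sorted_perm _ _ _)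
    refine h1.trans (flatMap_filter_perm _ _ _ hRnd ?_)
    intro x hx
    rw [List.mem_reverse, PySem.List.mem_pyRange_one]
    have := hmx x hx
    omega
  · rw [List.flatMap_def, List.pairwise_flatten]
    constructor
    · intro bl hbl
      obtain ⟨f, hf, rfl⟩ := List.mem_map.mp hbl
      have hnd : (PySem.List.sorted ((PySem.Set.ofList l).filter (fun c => (l.count c : Int) == f)) (fun c => c)).Nodup :=
        (PySem.List.sorted_perm _ _ _).nodup_iff.mpr ((PySem.Set.nodup_ofList l).filter _)
      have hle := PySem.List.sorted_pairwise ((PySem.Set.ofList l).filter (fun c => (l.count c : Int) == f)) (fun c => c)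
      refine (hle.and hnd).imp_of_mem ?_
      intro a b ha hb hab
      have hca : (l.count a : Int) = f := mem_block ha
      have hcb : (l.count b : Int) = f := mem_block hb
      have hlt : a < b := lt_of_le_of_ne hab.1 hab.2
      have htn : a.toNat < b.toNat := Nat.lt_of_succ_le hlt
      simp only [pvKey]
      omega
    · rw [List.pairwise_map]
      have hgt : ((PySem.List.pyRange 1 (mx + 1)).reverse).Pairwise (fun f1 f2 => f2 < f1) := by
        rw [List.pairwise_reverse]
        exact pyRange_pairwise_lt 1 (mx + 1)
      refine hgt.imp ?_
      intro f1 f2 h12 x hx y hy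
      have hcx : (l.count x : Int) = f1 := mem_block hx
      have hcy : (l.count y : Int) = f2 := mem_block hy
      have hbx := charBound x
      have hby := charBound y
      simp only [pvKey]
      omega

-- B's bucket dict looked up at f is the fibre of the count function at f, in key order.
lemma bucket_getD (l : List Char) (f : Int) :
    ((PySem.Dict.counter l).items.foldl
      (fun b p => b.modify p.2 [] (fun cs => cs ++ [p.1]))
      (PySem.Dict.empty : PySem.Dict Int (List Char))).getD f []
    = (PySem.Set.ofList l).filter (fun c => (l.count c : Int) == f) := by
  have hmap : (PySem.Dict.counter l).items.foldl
      (fun b p => b.modify p.2 [] (fun cs => cs ++ [p.1]))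
      (PySem.Dict.empty : PySem.Dict Int (List Char))
      = ((PySem.Dict.counter l).items.map Prod.swap).foldl
        (fun b q => b.modify q.1 [] (fun cs => cs ++ [q.2]))
        (PySem.Dict.empty : PySem.Dict Int (List Char)) := by
    rw [List.foldl_map]
    simp [Prod.swap]
  rw [hmap, PySem.Dict.getD_foldl_modify_append]
  simp [PySem.Dict.items_counter, List.map_map, List.filter_map, Function.comp_def]

-- B's emission loop, unrolled to a flatMap (empty buckets contribute nothing either way).
lemma loop_eq (B : PySem.Dict Int (List Char)) (R : List Int) : ∀ (acc : List (List Char)),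
    R.foldl (fun acc f =>
      if B.contains f then
        (PySem.List.sorted (B.getD f []) (fun c => c)).foldl
          (fun acc2 c => acc2 ++ [PySem.List.pyRepeat [c] f]) acc
      else acc) acc
    = acc ++ R.flatMap (fun f =>
        (PySem.List.sorted (B.getD f []) (fun c => c)).map (fun c => PySem.List.pyRepeat [c] f)) := by
  induction R with
  | nil => simp
  | cons f rest ih =>
    intro acc
    simp only [List.foldl_cons, List.flatMap_cons]
    by_cases h : B.contains f
    · rw [if_pos h, PySem.List.foldl_append_singleton_eq_map, ih, List.append_assoc]
    · rw [if_neg h, ih, PySem.Dict.getD_of_not_contains B [] (Bool.eq_false_iff.mpr (by simpa using h))]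
      simp [PySem.List.sorted]

lemma flatten_flatMap_map {α β γ : Type} (R : List α) (bl : α → List β) (g : α → β → List γ) :
    (R.flatMap (fun f => (bl f).map (g f))).flatten = R.flatMap (fun f => (bl f).flatMap (g f)) := by
  induction R with
  | nil => simp
  | cons f rest ih =>
    rw [List.flatMap_cons, List.flatten_append, ih, List.flatMap_cons, ← List.flatMap_def]

-- Every distinct character's count lies between 1 and B's running maximum mx.
lemma counts_cover (l : List Char) : ∀ x ∈ PySem.Set.ofList l,
    1 ≤ (l.count x : Int) ∧
    (l.count x : Int) ≤ (PySem.Dict.counter l).values.foldl (fun m n => max m n) (0 : Int) := by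
  intro x hx
  have hval : ((l.count x : Int)) ∈ (PySem.Dict.counter l).values := by
    simp only [PySem.Dict.values, PySem.Dict.items_counter, List.map_map]
    exact List.mem_map.mpr ⟨x, hx, rfl⟩
  constructor
  · have : x ∈ l := (PySem.Set.mem_ofList l x).mp hx
    have := List.count_pos_iff.mpr this
    omega
  · exact (PySem.List.le_foldl_max _ _).2 _ hval

lemma B_canon (val : String) :
    tri_occurrences_alt val = String.ofList (pvCanon val.toList) := by
  unfold tri_occurrences_alt pvCanon
  simp only [PySem.Dict.foldl_insert_getD_add_one_eq_counter]
  rw [loop_eq]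
  simp only [bucket_getD, List.nil_append]
  rw [flatten_flatMap_map]
  rw [show (fun (f : Int) => (PySem.List.sorted ((PySem.Set.ofList val.toList).filter (fun c => (val.toList.count c : Int) == f)) (fun c => c)).flatMap (fun c => PySem.List.pyRepeat [c] f))
      = (fun (f : Int) => (PySem.List.sorted ((PySem.Set.ofList val.toList).filter (fun c => (val.toList.count c : Int) == f)) (fun c => c)).flatMap (fun c => List.replicate (val.toList.count c) c)) from ?_]
  · rw [← List.flatMap_assoc, ← sorted_key_eq val.toList _ (counts_cover val.toList)]
  · funext f
    apply List.flatMap_congr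
    intro x hx
    rw [PySem.List.pyRepeat_singleton, ← mem_block hx, Int.toNat_natCast]

-- ===== VERDICT (by name: the statement is the Claim_ definition above) =====
theorem tri_occurrences_spec : Claim_equal_tri_occurrences := by
  intro val _
  unfold Spec_tri_occurrences
  rw [A_canon, B_canon]
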